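-- pv_equiv track=rewrite | github.com/lprzychodzien/advent_of_code_2023 | day2/day2.py | check_game_possible
-- ===== SOURCE A (Python) =====
-- def check_game_possible(game:list) -> bool:
--     limits = {
--         'red':12,
--         'green':13,
--         'blue':14,
--     }
--
--     for g in game:
--         for k,v in g.items():
--
--             if k not in limits:
--                 return False
--
--             if v > limits[k]:
--                 return False
--     return True
-- ===== SOURCE B (Python) =====
-- def check_game_possible(game: list) -> bool:
--     limits = {
--         'red': 12,
--         'green': 13,
--         'blue': 14,
--     }
--
--     # Pass 1: aggregate the maximum count seen for each color across all draws.
--     maxes = {}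
--     for g in game:
--         for k, v in g.items():
--             maxes[k] = max(maxes.get(k, v), v)
--
--     # Pass 2: compare the aggregate against the limits.
--     for k, v in maxes.items():
--         lim = limits.get(k)
--         if lim is None or v > lim:
--             return False
--     return True
-- ===== Notes on version B (the rewrite author's own statement) =====
-- stated objective: alternative
-- what changed: Replaced A's fused single-pass short-circuit check with a two-phase decomposition: first build a per-color max-count dictionary over all draws, then compare that aggregate against the limits in a separate pass.
import Mathlib
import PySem

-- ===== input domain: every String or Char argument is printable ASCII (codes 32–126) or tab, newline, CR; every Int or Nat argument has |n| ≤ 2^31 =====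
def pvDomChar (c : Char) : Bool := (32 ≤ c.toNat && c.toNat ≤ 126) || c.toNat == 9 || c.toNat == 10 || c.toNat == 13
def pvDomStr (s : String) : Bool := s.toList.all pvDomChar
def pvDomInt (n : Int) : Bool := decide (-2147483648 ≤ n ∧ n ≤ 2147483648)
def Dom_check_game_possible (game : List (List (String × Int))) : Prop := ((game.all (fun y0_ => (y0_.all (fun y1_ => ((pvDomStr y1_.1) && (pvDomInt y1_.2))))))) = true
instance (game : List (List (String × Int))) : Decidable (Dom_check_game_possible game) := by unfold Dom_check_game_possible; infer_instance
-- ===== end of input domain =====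

-- B replaces A's fused single-pass short-circuit check by a build-max-dict-then-compare decomposition (alternative, same cost).


-- ===== PORT A =====
-- the literal dict 'limits'
def cgpLimits : PySem.Dict String Int :=
  PySem.Dict.ofList [("red", 12), ("green", 13), ("blue", 14)]

-- inner 'for k,v in g.items()' loop with early return: some b = 'return b', none = fall through
def cgpInnerA (g : List (String × Int)) : Option Bool :=
  match g with
  | [] => none
  | (k, v) :: rest =>
    if !(cgpLimits.contains k) then some false
    -- 'limits[k]': the guard above ensures k is present, so getD with any default is exact
    else if v > cgpLimits.getD k 0 then some false
    else cgpInnerA rest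

def cgpOuterA (game : List (List (String × Int))) : Bool :=
  match game with
  | [] => true
  | g :: rest =>
    match cgpInnerA g with
    | some b => b
    | none => cgpOuterA rest

def check_game_possible (game : List (List (String × Int))) : Bool :=
  cgpOuterA game

-- ===== PORT B =====
-- pass 1: maxes[k] = max(maxes.get(k, v), v) over all draws
def cgpMaxes (game : List (List (String × Int))) : PySem.Dict String Int :=
  game.foldl
    (fun d g => g.foldl (fun d kv => d.insert kv.1 (max (d.getD kv.1 kv.2) kv.2)) d)
    PySem.Dict.empty

-- pass 2: 'for k,v in maxes.items(): lim = limits.get(k); if lim is None or v > lim: return False'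
def cgpCheckB (l : List (String × Int)) : Bool :=
  match l with
  | [] => true
  | (k, v) :: rest =>
    match cgpLimits.get? k with
    | none => false
    | some lim => if v > lim then false else cgpCheckB rest

def check_game_possible_alt (game : List (List (String × Int))) : Bool :=
  cgpCheckB (cgpMaxes game).items

-- ===== PRECONDITION & SPEC =====
def Spec_check_game_possible (game : List (List (String × Int))) (out : Bool) : Prop := out = check_game_possible_alt game
instance (game : List (List (String × Int))) (out : Bool) : Decidable (Spec_check_game_possible game out) := by unfold Spec_check_game_possible; infer_instance

-- ===== CLAIM (what is proved, stated in full; the proofs are below) =====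
def Claim_equal_check_game_possible : Prop := ∀ (game : List (List (String × Int))), Dom_check_game_possible game → Spec_check_game_possible game (check_game_possible game)

-- ===== LEMMAS AND PROOFS =====

-- a single (color, count) pair is within the limits
def cgpPairOk (kv : String × Int) : Bool :=
  match cgpLimits.get? kv.1 with
  | none => false
  | some lim => decide (kv.2 ≤ lim)

-- B's second pass is the conjunction of cgpPairOk over the list
lemma cgpCheckB_eq_all (l : List (String × Int)) : cgpCheckB l = l.all cgpPairOk := by
  induction l with
  | nil => rfl
  | cons kv rest ih =>
    obtain ⟨k, v⟩ := kv
    simp only [cgpCheckB, List.all_cons, cgpPairOk, ih]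
    cases h : cgpLimits.get? k with
    | none => simp
    | some lim =>
      by_cases hv : v > lim
      · simp [hv, not_le.mpr hv]
      · simp [hv, not_lt.mp hv]

-- A's inner loop falls through iff every pair of the draw is within limits
lemma cgpInnerA_eq (g : List (String × Int)) :
    cgpInnerA g = if g.all cgpPairOk then none else some false := by
  induction g with
  | nil => rfl
  | cons kv rest ih =>
    obtain ⟨k, v⟩ := kv
    simp only [cgpInnerA, List.all_cons, ih]
    cases h : cgpLimits.get? k with
    | none =>
      have hc : cgpLimits.contains k = false := by
        rw [PySem.Dict.contains_eq_isSome_get?, h]; rfl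
      simp [hc, cgpPairOk, h]
    | some lim =>
      have hc : cgpLimits.contains k = true := by
        rw [PySem.Dict.contains_eq_isSome_get?, h]; rfl
      have hg : cgpLimits.getD k 0 = lim := PySem.Dict.getD_of_get?_eq_some _ _ h
      have hp : cgpPairOk (k, v) = decide (v ≤ lim) := by simp [cgpPairOk, h]
      by_cases hv : v > lim
      · have hf : cgpPairOk (k, v) = false := by rw [hp]; exact decide_eq_false (not_le.mpr hv)
        simp only [hf]
        simp [hc, hg, hv]
      · have ht : cgpPairOk (k, v) = true := by rw [hp]; exact decide_eq_true (not_lt.mp hv)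
        simp only [ht, Bool.true_and]
        simp [hc, hg, hv]

-- A is the conjunction over all pairs of all draws
lemma cgpOuterA_eq (game : List (List (String × Int))) :
    cgpOuterA game = game.all (fun g => g.all cgpPairOk) := by
  induction game with
  | nil => rfl
  | cons g rest ih =>
    simp only [cgpOuterA, cgpInnerA_eq, List.all_cons, ih]
    by_cases h : g.all cgpPairOk = true
    · simp [h]
    · simp [h]

-- pointwise-equal predicates give equal 'all'
lemma cgpAllCongr {α : Type} {f g : α → Bool} (l : List α) (h : ∀ x ∈ l, f x = g x) :
    l.all f = l.all g := by
  induction l with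
  | nil => rfl
  | cons x rest ih =>
    simp only [List.all_cons, h x (List.mem_cons_self),
      ih (fun y hy => h y (List.mem_cons_of_mem _ hy))]

-- replacing the value at one key of a Nodup list, pointwise
lemma cgpAllUpdate {k : String} (ks : List String) (hk : k ∈ ks) (hnd : ks.Nodup)
    (f g : String → Bool) (b : Bool)
    (hne : ∀ k' ∈ ks, k' ≠ k → f k' = g k') (hkk : f k = (g k && b)) :
    ks.all f = (ks.all g && b) := by
  induction ks with
  | nil => cases hk
  | cons x rest ih =>
    rcases List.mem_cons.mp hk with rfl | hk'
    · have hrest : rest.all f = rest.all g := by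
        apply cgpAllCongr
        intro k' hk''
        exact hne k' (List.mem_cons_of_mem _ hk'') (fun h => (List.nodup_cons.mp hnd).1 (h ▸ hk''))
      simp only [List.all_cons, hkk, hrest]
      cases g k <;> cases b <;> cases rest.all g <;> rfl
    · have hx : f x = g x :=
        hne x (List.mem_cons_self) (fun h => (List.nodup_cons.mp hnd).1 (h ▸ hk'))
      have hih := ih hk' (List.nodup_cons.mp hnd).2
        (fun k' h h' => hne k' (List.mem_cons_of_mem _ h) h')
      simp only [List.all_cons, hx, hih]
      cases g x <;> cases b <;> cases rest.all g <;> rfl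

-- whole-dict check, as a function of keys (well-defined for Nodup keys)
def cgpOkD (d : PySem.Dict String Int) : Bool := d.items.all cgpPairOk

-- cgpPairOk splits over max
lemma cgpPairOk_max (k : String) (a b : Int) :
    cgpPairOk (k, max a b) = (cgpPairOk (k, a) && cgpPairOk (k, b)) := by
  simp only [cgpPairOk]
  cases cgpLimits.get? k with
  | none => rfl
  | some lim =>
    by_cases h1 : a ≤ lim <;> by_cases h2 : b ≤ lim <;>
      simp [h1, h2]

-- one insert step of B's first pass ANDs one pair into the aggregate check
lemma cgpOkD_insert (d : PySem.Dict String Int) (hnd : d.keys.Nodup) (k : String) (v : Int) :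
    cgpOkD (d.insert k (max (d.getD k v) v)) = (cgpOkD d && cgpPairOk (k, v)) := by
  have hnd' : (d.insert k (max (d.getD k v) v)).keys.Nodup := PySem.Dict.nodup_keys_insert _ _ _ hnd
  unfold cgpOkD
  rw [PySem.Dict.items_eq_map_keys _ hnd' 0, PySem.Dict.items_eq_map_keys _ hnd 0,
      List.all_map, List.all_map]
  by_cases hc : d.contains k = true
  · rw [PySem.Dict.keys_insert_of_contains _ _ hc]
    have hk : k ∈ d.keys := (PySem.Dict.contains_iff_mem_keys _ _).mp hc
    apply cgpAllUpdate d.keys hk hnd _ _ _ 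
    · intro k' _ hne
      simp [Function.comp, PySem.Dict.getD_insert, hne]
    · simp only [Function.comp, PySem.Dict.getD_insert, if_true]
      rw [cgpPairOk_max]
      congr 1
      rw [PySem.Dict.getD_eq_get?_getD, PySem.Dict.getD_eq_get?_getD]
      cases h : d.get? k with
      | none =>
        exfalso
        rw [PySem.Dict.contains_eq_isSome_get?, h] at hc; exact Bool.noConfusion hc
      | some w => rfl
  · have hc' : d.contains k = false := by rwa [Bool.not_eq_true] at hc
    rw [PySem.Dict.keys_insert_of_not_contains _ _ hc']
    have hgd : d.getD k v = v := PySem.Dict.getD_of_not_contains _ _ hc'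
    have hkn : k ∉ d.keys := fun h => by
      rw [(PySem.Dict.contains_iff_mem_keys _ _).mpr h] at hc'; exact Bool.noConfusion hc'
    rw [List.all_append]
    have h1 : (d.keys.all (cgpPairOk ∘ fun k' => (k', (d.insert k (max (d.getD k v) v)).getD k' 0)))
        = d.keys.all (cgpPairOk ∘ fun k' => (k', d.getD k' 0)) := by
      apply cgpAllCongr
      intro k' hk'
      have hne : k' ≠ k := fun h => hkn (h ▸ hk')
      simp [PySem.Dict.getD_insert, hne]
    rw [h1]
    simp [PySem.Dict.getD_insert, hgd]

-- B's first pass over one draw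
lemma cgpOkD_foldl_inner (g : List (String × Int)) (d : PySem.Dict String Int) (hnd : d.keys.Nodup) :
    cgpOkD (g.foldl (fun d kv => d.insert kv.1 (max (d.getD kv.1 kv.2) kv.2)) d)
      = (cgpOkD d && g.all cgpPairOk) := by
  induction g generalizing d with
  | nil => simp
  | cons kv rest ih =>
    obtain ⟨k, v⟩ := kv
    simp only [List.foldl_cons, List.all_cons]
    rw [ih _ (PySem.Dict.nodup_keys_insert _ _ _ hnd), cgpOkD_insert d hnd k v, Bool.and_assoc]

-- B's first pass over the whole game
lemma cgpOkD_foldl_outer (game : List (List (String × Int))) (d : PySem.Dict String Int)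
    (hnd : d.keys.Nodup) :
    cgpOkD (game.foldl
        (fun d g => g.foldl (fun d kv => d.insert kv.1 (max (d.getD kv.1 kv.2) kv.2)) d) d)
      = (cgpOkD d && game.all (fun g => g.all cgpPairOk)) := by
  induction game generalizing d with
  | nil => simp
  | cons g rest ih =>
    simp only [List.foldl_cons, List.all_cons]
    rw [ih _ (by
      have := PySem.Dict.nodup_keys_foldl_insert_key g (fun kv => kv.1)
        (fun d kv => max (d.getD kv.1 kv.2) kv.2) d hnd
      exact this), cgpOkD_foldl_inner g d hnd, Bool.and_assoc]

-- ===== VERDICT (by name: the statement is the Claim_ definition above) =====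
theorem check_game_possible_spec : Claim_equal_check_game_possible := by
  intro game _
  unfold Spec_check_game_possible check_game_possible check_game_possible_alt cgpMaxes
  rw [cgpOuterA_eq, cgpCheckB_eq_all]
  have h := cgpOkD_foldl_outer game PySem.Dict.empty (PySem.Dict.nodup_keys_empty)
  unfold cgpOkD at h
  rw [h]
  simp [PySem.Dict.empty]
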